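-- pv_equiv track=rewrite | github.com/KrzysztofSwedziol/ASD- | zadania offline ASD/zad3/zad3.py | strong_string
-- ===== SOURCE A (Python) =====
-- def strong_string(T):
--
--     n = len(T)
--
--     def kwadratuj(napis):
--
--         if napis[::-1] < napis:
--
--             return napis[::-1]
--
--         return napis
--
--     def koduj(napis):
--
--         kod = ord(napis[0]) + ord(napis[-1])
--         kod *= len(napis)
--         kod = kod**2 - ord(napis[0])
--         kod = kod % n
--
--         return kod
--
--     def dodaj(tab, napis):
--
--         index = koduj(napis)
--
--         if tab[index][0] is None:
--             tab[index][0] = [napis, 1]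
--             return 1
--
--         else:
--
--             for i in range(len(tab[index])):
--
--                 if tab[index][i][0] == napis:
--                     tab[index][i][1] += 1
--                     return tab[index][i][1]
--
--             tab[index].append([napis, 1])
--             return 1
--
--     for i in range(len(T)):
--
--         T[i] = kwadratuj(T[i])
--
--     napisy = [[None] for _ in range(n)]
--
--     wynik = 1
--     for i in range(n):
--
--         score = dodaj(napisy, T[i])
--
--         if score > wynik:
--             wynik = score
--
--     return wynik
-- ===== SOURCE B (Python) =====
-- def strong_string(T):
--     # canonicalize each string in place (same mutation as A's first loop)
--     for i in range(len(T)):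
--         r = T[i][::-1]
--         if r < T[i]:
--             T[i] = r
--     # max frequency = longest run of equal strings in a sorted copy
--     S = sorted(T)
--     best = 1
--     run = 0
--     prev = None
--     for s in S:
--         if s == prev:
--             run += 1
--         else:
--             run = 1
--             prev = s
--         if run > best:
--             best = run
--     return best
-- ===== Notes on version B (the rewrite author's own statement) =====
-- stated objective: faster
-- what changed: Replaces A's hand-rolled hash table (custom Python-level hash function, bucket scans and an incremental max of counts) by canonicalize, then sort a copy and take the longest run of equal strings in one scan.
import Mathlib
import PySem

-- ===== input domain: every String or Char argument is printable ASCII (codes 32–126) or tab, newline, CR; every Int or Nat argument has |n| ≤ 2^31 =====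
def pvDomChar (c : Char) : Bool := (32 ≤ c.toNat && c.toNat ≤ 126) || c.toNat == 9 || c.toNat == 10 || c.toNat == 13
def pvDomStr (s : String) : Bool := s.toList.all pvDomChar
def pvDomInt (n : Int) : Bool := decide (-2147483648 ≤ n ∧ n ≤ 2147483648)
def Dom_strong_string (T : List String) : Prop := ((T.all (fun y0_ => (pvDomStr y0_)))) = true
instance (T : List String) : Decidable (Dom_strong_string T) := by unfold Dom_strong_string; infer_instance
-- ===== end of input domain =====

-- B replaces A's hand-rolled hash table of counts by sort + longest-run scan (measurably
-- faster by a constant factor); both Pythons canonicalize T in place — the theorems below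
-- are about the RETURN value only (both perform the same mutation).

-- ===== PORT A =====
-- napis[::-1] (never raises; step is the literal -1)
def pvRev (s : String) : String := (PySem.Str.slice? s none none (-1)).getD s

def kwadratuj (s : String) : String :=
  if pvRev s < s then pvRev s else s

def koduj (n : Int) (s : String) : Option Int :=
  match PySem.Str.pyGet? s 0, PySem.Str.pyGet? s (-1) with
  | some c0, some cl =>
      let kod := (c0.toNat : Int) + (cl.toNat : Int)
      let kod := kod * (PySem.Str.len s : Int)
      let kod := kod ^ 2 - (c0.toNat : Int)
      some (PySem.Int.mod kod n)
  | _, _ => none  -- IndexError on the empty string (outside Pre_)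

-- the 'for i in range(len(tab[index]))' scan inside dodaj; [] = loop fell through (append + return 1)
def scanBucket (s : String) : List (Option (String × Int)) → Option (List (Option (String × Int)) × Int)
  | [] => some ([some (s, 1)], 1)
  | none :: _ => none  -- entry None: Python would raise (unreachable under Pre_)
  | some (t, c) :: rest =>
      if t = s then some (some (t, c + 1) :: rest, c + 1)
      else (scanBucket s rest).map (fun r => (some (t, c) :: r.1, r.2))

def dodaj (n : Int) (tab : List (List (Option (String × Int)))) (s : String) :
    Option (List (List (Option (String × Int))) × Int) :=
  match koduj n s with
  | none => none
  | some idx =>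
    match PySem.List.pyGet? tab idx with
    | none => none
    | some bucket =>
      match PySem.List.pyGet? bucket 0 with
      | none => none
      | some e0 =>
        match e0 with
        | none => some (PySem.List.pySetD tab idx (PySem.List.pySetD bucket 0 (some (s, 1))), 1)
        | some _ =>
          match scanBucket s bucket with
          | none => none
          | some r => some (PySem.List.pySetD tab idx r.1, r.2)

def loopA (n : Int) : List String → List (List (Option (String × Int))) → Int → Option Int
  | [], _, w => some w
  | s :: rest, tab, w =>
      match dodaj n tab s with
      | none => none
      | some r => loopA n rest r.1 (if r.2 > w then r.2 else w)

def strong_string (T : List String) : Int :=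
  let n : Int := (T.length : Int)
  let C := T.map kwadratuj
  match loopA n C (List.replicate T.length [none]) 1 with
  | some w => w
  | none => 0  -- Python raised here: outside Pre_

-- ===== PORT B =====
def stepB (acc : Int × Int × Option String) (s : String) : Int × Int × Option String :=
  let best := acc.1
  let rp := if acc.2.2 = some s then (acc.2.1 + 1, acc.2.2) else (1, some s)
  (if rp.1 > best then rp.1 else best, rp)

def strong_string_alt (T : List String) : Int :=
  let C := T.map (fun t => let r := pvRev t; if r < t then r else t)
  let S := PySem.List.sorted C (fun x => x) false
  (S.foldl stepB (1, 0, none)).1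

-- ===== PRECONDITION & SPEC =====
-- Pre_ excludes exactly the lists containing an empty string: there A raises IndexError
-- (koduj reads napis[0]).
def Pre_strong_string (T : List String) : Prop := ∀ s ∈ T, s ≠ ""
instance (T : List String) : Decidable (Pre_strong_string T) := by
  unfold Pre_strong_string; infer_instance

def pvWitness_strong_string : List String := ["ab", "ba", "c"]

def Spec_strong_string (T : List String) (out : Int) : Prop := out = strong_string_alt T
instance (T : List String) (out : Int) : Decidable (Spec_strong_string T out) := by
  unfold Spec_strong_string; infer_instance

-- ===== CLAIM (what is proved, stated in full; the proofs are below) =====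
def Claim_equal_strong_string : Prop :=
  ∀ (T : List String), Dom_strong_string T → Pre_strong_string T →
    Spec_strong_string T (strong_string T)

-- ===== LEMMAS AND PROOFS =====

-- count of s in C, as an Int
def cnt (C : List String) (s : String) : Int := (C.count s : Int)

-- max(1, max multiplicity in C): the common value of both programs
def maxc (C : List String) : Int := C.foldl (fun m s => max m (cnt C s)) 1

lemma foldl_max_le {α : Type} (l : List α) (f : α → Int) (a b : Int)
    (ha : a ≤ b) (h : ∀ x ∈ l, f x ≤ b) :
    l.foldl (fun m x => max m (f x)) a ≤ b := by
  induction l generalizing a with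
  | nil => exact ha
  | cons x xs ih =>
      exact ih _ (max_le ha (h x (by simp))) (fun y hy => h y (by simp [hy]))

lemma one_le_maxc (C : List String) : 1 ≤ maxc C :=
  (PySem.List.le_foldl_max_int C (cnt C) 1).1

lemma cnt_le_maxc (C : List String) {s : String} (hs : s ∈ C) : cnt C s ≤ maxc C :=
  (PySem.List.le_foldl_max_int C (cnt C) 1).2 s hs

lemma eq_maxc {C : List String} {m : Int} (h1 : 1 ≤ m)
    (h2 : ∀ s ∈ C, cnt C s ≤ m)
    (h3 : m = 1 ∨ ∃ s ∈ C, cnt C s = m) : m = maxc C := by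
  refine le_antisymm ?_ (foldl_max_le C (cnt C) 1 m h1 h2)
  rcases h3 with rfl | ⟨s, hs, rfl⟩
  · exact one_le_maxc C
  · exact cnt_le_maxc C hs

lemma foldl_max_attained {α : Type} (l : List α) (f : α → Int) (a : Int) :
    l.foldl (fun m x => max m (f x)) a = a ∨
      ∃ x ∈ l, f x = l.foldl (fun m x => max m (f x)) a := by
  induction l generalizing a with
  | nil => exact Or.inl rfl
  | cons x xs ih =>
      rcases ih (max a (f x)) with h | ⟨y, hy, hfy⟩
      · rcases le_total (f x) a with hle | hle
        · left; rw [List.foldl_cons, h, max_eq_left hle]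
        · right; exact ⟨x, by simp, by rw [List.foldl_cons, h, max_eq_right hle]⟩
      · right; exact ⟨y, by simp [hy], by rw [List.foldl_cons]; exact hfy⟩

lemma maxc_attained (C : List String) : maxc C = 1 ∨ ∃ s ∈ C, cnt C s = maxc C :=
  foldl_max_attained C (cnt C) 1

lemma cnt_append_singleton_ne {P : List String} {s t : String} (h : t ≠ s) :
    cnt (P ++ [s]) t = cnt P t := by
  simp [cnt, List.count_append, Ne.symm h]

lemma cnt_le_cnt_append_singleton (P : List String) (s t : String) :
    cnt P t ≤ cnt (P ++ [s]) t := by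
  simp [cnt, List.count_append]

lemma maxc_append_singleton (P : List String) (s : String) :
    maxc (P ++ [s]) = max (maxc P) (cnt (P ++ [s]) s) := by
  have h2 : ∀ t ∈ P ++ [s], cnt (P ++ [s]) t ≤ max (maxc P) (cnt (P ++ [s]) s) := by
    intro t ht
    by_cases hts : t = s
    · subst hts; exact le_max_right _ _
    · have htP : t ∈ P := by
        rcases List.mem_append.mp ht with h | h
        · exact h
        · exact absurd (List.mem_singleton.mp h) hts
      rw [cnt_append_singleton_ne hts]
      exact le_trans (cnt_le_maxc P htP) (le_max_left _ _)
  refine (eq_maxc (le_trans (one_le_maxc P) (le_max_left _ _)) h2 ?_).symm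
  rcases max_cases (maxc P) (cnt (P ++ [s]) s) with ⟨hm, _⟩ | ⟨hm, _⟩
  · rw [hm]
    rcases maxc_attained P with h1 | ⟨t, htP, hct⟩
    · exact Or.inl h1
    · refine Or.inr ⟨t, List.mem_append.mpr (Or.inl htP), le_antisymm ?_ ?_⟩
      · rw [← hm]; exact h2 t (List.mem_append.mpr (Or.inl htP))
      · rw [← hct]; exact cnt_le_cnt_append_singleton P s t
  · exact Or.inr ⟨s, by simp, hm.symm ▸ rfl⟩

-- ---------- A side ----------

def bCount : List (Option (String × Int)) → String → Int
  | [], _ => 0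
  | none :: rest, s => bCount rest s
  | some (t, c) :: rest, s => if t = s then c else bCount rest s

def WFb (b : List (Option (String × Int))) : Prop :=
  b = [none] ∨ (b ≠ [] ∧ ∀ e ∈ b, e ≠ none)

def tlookup (n : Int) (tab : List (List (Option (String × Int)))) (s : String) : Int :=
  match koduj n s with
  | none => 0
  | some idx =>
    match PySem.List.pyGet? tab idx with
    | none => 0
    | some b => bCount b s

lemma koduj_some {n : Int} (hn : 0 < n) {s : String} (hs : s ≠ "") :
    ∃ idx, koduj n s = some idx ∧ 0 ≤ idx ∧ idx < n := by
  have h : s.toList ≠ [] := by simpa using hs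
  rcases List.exists_cons_of_ne_nil h with ⟨c, rest, hc⟩
  have h0 : PySem.Str.pyGet? s 0 = some c := by simp [hc]
  have h1 : PySem.Str.pyGet? s (-1) = some ((c :: rest).getLast (by simp)) := by
    simp only [PySem.Str.pyGet?_eq, PySem.Chars.pyGet?_eq_listPyGet?,
      PySem.List.pyGet?_neg_one, hc]
    simp [List.getLast?_eq_some_getLast]
  have heq : koduj n s = some (PySem.Int.mod
      ((((c.toNat : Int) + ((((c :: rest).getLast (by simp)).toNat : Int))) *
        (PySem.Str.len s : Int)) ^ 2 - (c.toNat : Int)) n) := by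
    rw [koduj, h0, h1]
  exact ⟨_, heq, PySem.Int.mod_nonneg _ hn, PySem.Int.mod_lt _ hn⟩

lemma scanBucket_spec (s : String) (b : List (Option (String × Int)))
    (h : ∀ e ∈ b, e ≠ none) :
    ∃ b', scanBucket s b = some (b', bCount b s + 1) ∧ b' ≠ [] ∧
      (∀ e ∈ b', e ≠ none) ∧ bCount b' s = bCount b s + 1 ∧
      ∀ t, t ≠ s → bCount b' t = bCount b t := by
  induction b with
  | nil =>
      refine ⟨[some (s, 1)], rfl, by simp, by simp, by simp [bCount], ?_⟩
      intro t ht; simp [bCount, Ne.symm ht]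
  | cons e rest ih =>
      match e with
      | none => exact absurd rfl (h none (by simp))
      | some (t, c) =>
        by_cases hts : t = s
        · subst hts
          refine ⟨some (t, c + 1) :: rest, by simp [scanBucket, bCount], by simp, ?_,
            by simp [bCount], ?_⟩
          · intro e he
            rcases List.mem_cons.mp he with rfl | he
            · simp
            · exact h e (by simp [he])
          · intro u hu; simp [bCount, Ne.symm hu]
        · rcases ih (fun e he => h e (by simp [he])) with
            ⟨b', hb', hne, hsome, hcs, hct⟩
          refine ⟨some (t, c) :: b', ?_, by simp, ?_, ?_, ?_⟩
          · simp [scanBucket, bCount, hts, hb']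
          · intro e he
            rcases List.mem_cons.mp he with rfl | he
            · simp
            · exact hsome e he
          · simp [bCount, hts, hcs]
          · intro u hu
            by_cases htu : t = u <;> simp [bCount, htu, hct u hu]

lemma koduj_bounds {n idx : Int} {s : String} (hn : 0 < n)
    (h : koduj n s = some idx) : 0 ≤ idx ∧ idx < n := by
  cases hg0 : PySem.List.pyGet? s.toList 0 with
  | none => simp [koduj, hg0] at h
  | some c0 =>
    cases hg1 : PySem.List.pyGet? s.toList (-1) with
    | none => simp [koduj, hg0, hg1] at h
    | some cl =>
      simp only [koduj, PySem.Str.pyGet?_eq, PySem.Chars.pyGet?_eq_listPyGet?,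
        hg0, hg1, Option.some.injEq] at h
      subst h
      exact ⟨PySem.Int.mod_nonneg _ hn, PySem.Int.mod_lt _ hn⟩

lemma tlookup_set {n : Int} (hn : 0 < n) (tab : List (List (Option (String × Int))))
    (hlen : (tab.length : Int) = n) {idx : Int} (h0 : 0 ≤ idx)
    {s : String} (hks : koduj n s = some idx) (b' : List (Option (String × Int)))
    (hidx : idx.toNat < tab.length)
    (hs' : bCount b' s = bCount tab[idx.toNat] s + 1)
    (hother : ∀ t, t ≠ s → bCount b' t = bCount tab[idx.toNat] t) :
    tlookup n (tab.set idx.toNat b') s = tlookup n tab s + 1 ∧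
    ∀ t, t ≠ s → tlookup n (tab.set idx.toNat b') t = tlookup n tab t := by
  have hget : ∀ (j : Int) (hj0 : 0 ≤ j) (hjlen : j.toNat < tab.length),
      PySem.List.pyGet? (tab.set idx.toNat b') j =
        some (if idx.toNat = j.toNat then b' else tab[j.toNat]) := by
    intro j hj0 hjlen
    rw [PySem.List.pyGet?_of_nonneg _ hj0, List.getElem?_set]
    by_cases he : idx.toNat = j.toNat
    · have h' : idx.toNat < tab.length := he ▸ hjlen
      rw [if_pos he, if_pos h', if_pos he]
    · rw [if_neg he, if_neg he, List.getElem?_eq_getElem hjlen]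
  constructor
  · simp only [tlookup, hks, hget idx h0 hidx,
      PySem.List.pyGet?_of_nonneg _ h0, List.getElem?_eq_getElem hidx]
    simp [hs']
  · intro t ht
    simp only [tlookup]
    cases hkt : koduj n t with
    | none => rfl
    | some j =>
      obtain ⟨hj0, hj1⟩ := koduj_bounds hn hkt
      have hjlen : j.toNat < tab.length := by omega
      simp only [hget j hj0 hjlen, PySem.List.pyGet?_of_nonneg _ hj0,
        List.getElem?_eq_getElem hjlen]
      by_cases he : idx.toNat = j.toNat
      · have hgj : tab[j.toNat] = tab[idx.toNat] := by
          congr 1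
          exact he.symm
        rw [if_pos he, hgj]
        exact hother t ht
      · simp [he]

lemma dodaj_spec {n : Int} (hn : 0 < n) (tab : List (List (Option (String × Int))))
    (hlen : (tab.length : Int) = n) (hwf : ∀ b ∈ tab, WFb b)
    {s : String} (hs : s ≠ "") :
    ∃ tab', dodaj n tab s = some (tab', tlookup n tab s + 1) ∧
      tab'.length = tab.length ∧ (∀ b ∈ tab', WFb b) ∧
      tlookup n tab' s = tlookup n tab s + 1 ∧
      ∀ t, t ≠ s → tlookup n tab' t = tlookup n tab t := by
  obtain ⟨idx, hks, h0, h1⟩ := koduj_some hn hs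
  have hidx : idx.toNat < tab.length := by omega
  have hbg : PySem.List.pyGet? tab idx = some tab[idx.toNat] :=
    PySem.List.pyGet?_eq_some_getElem tab h0 (by omega)
  have hlook : tlookup n tab s = bCount tab[idx.toNat] s := by
    simp only [tlookup, hks, hbg]
  have hwfset : ∀ (b' : List (Option (String × Int))), WFb b' →
      ∀ b ∈ tab.set idx.toNat b', WFb b := by
    intro b' hwf' b hbmem
    rcases List.mem_or_eq_of_mem_set hbmem with hmem | rfl
    · exact hwf b hmem
    · exact hwf'
  rcases hwf tab[idx.toNat] (List.getElem_mem hidx) with hb1 | ⟨hne, hall⟩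
  · -- bucket is [None]: first insertion
    have hbn : PySem.List.pyGet? tab[idx.toNat] 0 = some none := by
      rw [hb1]; rfl
    have hnew : PySem.List.pySetD tab[idx.toNat] 0 (some (s, 1)) = [some (s, 1)] := by
      rw [hb1]; rfl
    have hdo : dodaj n tab s =
        some (tab.set idx.toNat [some (s, 1)], 1) := by
      simp only [dodaj, hks, hbg, hbn, hnew, PySem.List.pySetD_of_nonneg _ _ h0]
    have h00 : bCount tab[idx.toNat] s = 0 := by rw [hb1]; rfl
    obtain ⟨hls, hlt⟩ := tlookup_set hn tab hlen h0 hks [some (s, 1)] hidx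
      (by rw [h00]; simp [bCount])
      (fun t ht => by rw [hb1]; simp [bCount, Ne.symm ht])
    refine ⟨tab.set idx.toNat [some (s, 1)], ?_, by simp, hwfset _ (Or.inr ⟨by simp, by simp⟩), hls, hlt⟩
    rw [hdo, hlook, h00]
    norm_num
  · -- bucket has real entries: scan it
    obtain ⟨e, brest, hbe⟩ := List.exists_cons_of_ne_nil hne
    have h0b : PySem.List.pyGet? tab[idx.toNat] 0 = some e := by
      rw [hbe]
      exact PySem.List.pyGet?_zero_cons e brest
    match e, hall e (by rw [hbe]; simp) with
    | some p, _ =>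
      obtain ⟨b', hscan, hb'ne, hb'some, hcs, hct⟩ := scanBucket_spec s tab[idx.toNat] hall
      have hdo : dodaj n tab s =
          some (tab.set idx.toNat b', bCount tab[idx.toNat] s + 1) := by
        simp only [dodaj, hks, hbg, h0b, hscan, PySem.List.pySetD_of_nonneg _ _ h0]
      obtain ⟨hls, hlt⟩ := tlookup_set hn tab hlen h0 hks b' hidx hcs hct
      exact ⟨tab.set idx.toNat b', by rw [hdo, hlook], by simp,
        hwfset _ (Or.inr ⟨hb'ne, hb'some⟩), hls, hlt⟩

lemma loopA_spec {n : Int} (hn : 0 < n) (C : List String) :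
    ∀ (R P : List String) (tab : List (List (Option (String × Int)))) (w : Int),
      C = P ++ R →
      (tab.length : Int) = n → (∀ b ∈ tab, WFb b) →
      (∀ s, tlookup n tab s = (P.count s : Int)) →
      (∀ s ∈ R, s ≠ "") →
      loopA n R tab w = some (R.foldl (fun m s => max m (cnt C s)) w) := by
  intro R
  induction R with
  | nil => intro P tab w _ _ _ _ _; rfl
  | cons s R' ih =>
    intro P tab w hCP hlen hwf hlook hR
    obtain ⟨tab', hdo, hlen', hwf', hls, hlt⟩ :=
      dodaj_spec hn tab hlen hwf (hR s (by simp))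
    have hscore : tlookup n tab s + 1 = (P.count s : Int) + 1 := by rw [hlook]
    have hlook' : ∀ t, tlookup n tab' t = ((P ++ [s]).count t : Int) := by
      intro t
      by_cases hts : t = s
      · subst hts
        rw [hls, hlook]
        simp [List.count_append]
      · rw [hlt t hts, hlook]
        simp [List.count_append, Ne.symm hts]
    have hrec := ih (P ++ [s]) tab' (if tlookup n tab s + 1 > w then tlookup n tab s + 1 else w)
      (by rw [hCP, List.append_assoc]; rfl)
      (by rw [hlen', hlen]) hwf' hlook' (fun t ht => hR t (by simp [ht]))
    have hmax : (if tlookup n tab s + 1 > w then tlookup n tab s + 1 else w) =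
        max w ((P.count s : Int) + 1) := by
      rw [hlook]; split <;> omega
    have hcntC : cnt C s = (P.count s : Int) + 1 + (R'.count s : Int) := by
      rw [hCP]
      simp [cnt, List.count_append]
      ring
    have hfold : R'.foldl (fun m t => max m (cnt C t)) (max w ((P.count s : Int) + 1)) =
        R'.foldl (fun m t => max m (cnt C t)) (max w (cnt C s)) := by
      by_cases hsR : s ∈ R'
      · have hle : (P.count s : Int) + 1 ≤ cnt C s := by
          have : 1 ≤ (R'.count s : Int) := by
            exact_mod_cast List.one_le_count_iff.mpr hsR
          omega
        have hub := PySem.List.le_foldl_max_int R' (cnt C) (max w (cnt C s))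
        have hub' := PySem.List.le_foldl_max_int R' (cnt C) (max w ((P.count s : Int) + 1))
        refine le_antisymm
          (foldl_max_le R' (cnt C) _ _ (le_trans (max_le_max_left w hle) hub.1) hub.2)
          (foldl_max_le R' (cnt C) _ _ (max_le (le_trans (le_max_left _ _) hub'.1)
            (hub'.2 s hsR)) hub'.2)
      · have h0 : (R'.count s : Int) = 0 := by
          exact_mod_cast List.count_eq_zero_of_not_mem hsR
        rw [hcntC, h0, add_zero]
    rw [loopA, hdo]
    dsimp only
    rw [hrec, hmax, hfold]
    rfl

lemma pvRev_ne_empty {s : String} (h : s ≠ "") : pvRev s ≠ "" := by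
  rw [pvRev, PySem.Str.slice?_none_none_neg_one]
  intro hc
  apply h
  have := congrArg String.toList hc
  simp at this
  exact String.ext (by simp [this])

lemma kwadratuj_ne_empty {s : String} (h : s ≠ "") : kwadratuj s ≠ "" := by
  rw [kwadratuj]
  split
  · exact pvRev_ne_empty h
  · exact h

lemma tlookup_replicate (n : Int) (k : Nat) (s : String) :
    tlookup n (List.replicate k [none]) s = 0 := by
  rw [tlookup]
  cases hk : koduj n s with
  | none => rfl
  | some idx =>
    simp only
    cases hg : PySem.List.pyGet? (List.replicate k ([none] : List (Option (String × Int)))) idx with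
    | none => simp
    | some b =>
      have hb : b = [none] :=
        List.eq_of_mem_replicate (PySem.List.mem_of_pyGet?_eq_some _ hg)
      simp [hb, bCount]

lemma strong_string_eq_maxc (T : List String) (hT : ∀ s ∈ T, s ≠ "") :
    strong_string T = maxc (T.map kwadratuj) := by
  cases hT0 : T with
  | nil => rfl
  | cons t0 trest =>
    rw [← hT0]
    have hn : 0 < (T.length : Int) := by rw [hT0]; simp
    have hloop := loopA_spec hn (T.map kwadratuj)
      (T.map kwadratuj) [] (List.replicate T.length [none]) 1 rfl (by simp)
      (fun b hb => Or.inl (List.eq_of_mem_replicate hb))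
      (fun s => by rw [tlookup_replicate]; rfl)
      (by
        intro s hsC
        obtain ⟨t, htT, rfl⟩ := List.mem_map.mp hsC
        exact kwadratuj_ne_empty (hT t htT))
    simp only [strong_string, hloop]
    rfl

-- ---------- B side ----------

def runp (P : List String) : Int :=
  match P.getLast? with
  | none => 0
  | some v => (P.count v : Int)

-- in a ≤-sorted list, an element unequal to the last of the prefix cannot occur in the prefix
lemma not_mem_of_sorted_getLast {P R' : List String} {s : String}
    (hp : (P ++ s :: R').Pairwise (· ≤ ·)) (hlast : P.getLast? ≠ some s) : s ∉ P := by
  intro hmem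
  obtain ⟨P1, P2, rfl⟩ := List.append_of_mem hmem
  have hPle : ∀ a ∈ P1 ++ s :: P2, a ≤ s :=
    fun a ha => (List.pairwise_append.mp hp).2.2 a ha s (by simp)
  have hP : (P1 ++ s :: P2).Pairwise (· ≤ ·) := (List.pairwise_append.mp hp).1
  have hsP2 : ∀ y ∈ P2, s ≤ y := by
    have h2 := (List.pairwise_append.mp hP).2.1
    exact fun y hy => (List.pairwise_cons.mp h2).1 y hy
  cases hP2 : P2 with
  | nil =>
    apply hlast
    subst hP2
    exact List.getLast?_concat
  | cons z zs =>
    subst hP2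
    have hP2ne : (z :: zs : List String) ≠ [] := by simp
    have hw := List.getLast?_eq_some_getLast hP2ne
    have hwmem : (z :: zs).getLast hP2ne ∈ z :: zs := List.getLast_mem hP2ne
    have hws : (z :: zs).getLast hP2ne = s :=
      le_antisymm (hPle _ (List.mem_append.mpr (Or.inr (List.mem_cons.mpr (Or.inr hwmem)))))
        (hsP2 _ hwmem)
    apply hlast
    rw [List.getLast?_append,
      show (s :: z :: zs : List String) = [s] ++ z :: zs from rfl,
      List.getLast?_append, hw, hws]
    rfl

lemma stepB_sorted {P R' : List String} {s : String}
    (hp : (P ++ s :: R').Pairwise (· ≤ ·)) :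
    stepB (maxc P, runp P, P.getLast?) s =
      (maxc (P ++ [s]), runp (P ++ [s]), (P ++ [s]).getLast?) := by
  have hlast : (P ++ [s]).getLast? = some s := List.getLast?_concat
  have hrunp' : runp (P ++ [s]) = ((P ++ [s]).count s : Int) := by
    rw [runp, hlast]
  rw [hrunp', hlast, maxc_append_singleton]
  by_cases heq : P.getLast? = some s
  · have hrunp : runp P = (P.count s : Int) := by rw [runp, heq]
    have hcount : ((P ++ [s]).count s : Int) = (P.count s : Int) + 1 := by
      simp [List.count_append]
    simp only [stepB, heq, if_pos, hrunp, cnt, hcount]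
    refine Prod.ext ?_ (Prod.ext rfl rfl)
    simp only
    omega
  · have hnot : s ∉ P := not_mem_of_sorted_getLast hp heq
    have hcount : ((P ++ [s]).count s : Int) = 1 := by
      simp [List.count_append, List.count_eq_zero_of_not_mem hnot]
    have h1 : (1 : Int) ≤ maxc P := one_le_maxc P
    simp only [stepB, if_neg heq, cnt, hcount]
    refine Prod.ext ?_ (Prod.ext rfl rfl)
    simp only
    omega

lemma scanB_spec : ∀ (R P : List String), (P ++ R).Pairwise (· ≤ ·) →
    R.foldl stepB (maxc P, runp P, P.getLast?) =
      (maxc (P ++ R), runp (P ++ R), (P ++ R).getLast?) := by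
  intro R
  induction R with
  | nil => intro P _; simp
  | cons s R' ih =>
    intro P hp
    rw [List.foldl_cons, stepB_sorted hp]
    have := ih (P ++ [s]) (by rw [List.append_assoc]; exact hp)
    rw [this]
    simp

lemma maxc_of_perm {C S : List String} (h : S.Perm C) : maxc S = maxc C := by
  refine eq_maxc (one_le_maxc S) (fun s hs => ?_) ?_
  · have hc : cnt C s = cnt S s := by simp [cnt, h.count_eq]
    rw [hc]
    exact cnt_le_maxc S (h.mem_iff.mpr hs)
  · rcases maxc_attained S with h1 | ⟨s, hs, hcs⟩
    · exact Or.inl h1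
    · refine Or.inr ⟨s, h.mem_iff.mp hs, ?_⟩
      rw [show cnt C s = cnt S s from by simp [cnt, h.count_eq]]
      exact hcs

lemma strong_string_alt_eq_maxc (T : List String) :
    strong_string_alt T = maxc (T.map kwadratuj) := by
  show ((PySem.List.sorted (T.map kwadratuj) (fun x => x) false).foldl stepB
    (1, 0, none)).1 = maxc (T.map kwadratuj)
  have hpw : (PySem.List.sorted (T.map kwadratuj) (fun x => x) false).Pairwise (· ≤ ·) := by
    simpa using PySem.List.sorted_pairwise (xs := T.map kwadratuj) (key := fun x => x)
  have h := scanB_spec (PySem.List.sorted (T.map kwadratuj) (fun x => x) false) []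
    (by simpa using hpw)
  simp only [List.nil_append] at h
  have hinit : ((1 : Int), (0 : Int), (none : Option String)) =
      ((maxc []), runp [], ([] : List String).getLast?) := rfl
  rw [hinit, h]
  exact maxc_of_perm (PySem.List.sorted_perm (T.map kwadratuj) (fun x => x) false)

-- ===== VERDICT (by name: the statement is the Claim_ definition above) =====
theorem strong_string_spec : Claim_equal_strong_string := by
  intro T _ hpre
  show strong_string T = strong_string_alt T
  rw [strong_string_eq_maxc T hpre, strong_string_alt_eq_maxc T]
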